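-- pv_equiv track=rewrite | github.com/coutakagi/2024v1 | utl/utlfiles.py | getcontentname
-- ===== SOURCE A (Python) =====
-- def getcontentname(tsk0):
--     tsk=""
--     sps_tsk=tsk0.split("-")
--     for i, st in enumerate(sps_tsk):
--         if i>0:
--             tsk+=st
--         if i<len(sps_tsk)-1 and i>0:
--             tsk+="-"
--     return tsk
-- ===== SOURCE B (Python) =====
-- def getcontentname(tsk0):
--     idx = tsk0.find("-")
--     if idx == -1:
--         return ""
--     return tsk0[idx + 1:]
-- ===== Notes on version B (the rewrite author's own statement) =====
-- stated objective: simpler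
-- what changed: B locates the first hyphen with find and returns the suffix slice after it (empty string if none), instead of splitting into a segment list and re-concatenating all later segments with separators in an indexed loop.
import Mathlib
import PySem

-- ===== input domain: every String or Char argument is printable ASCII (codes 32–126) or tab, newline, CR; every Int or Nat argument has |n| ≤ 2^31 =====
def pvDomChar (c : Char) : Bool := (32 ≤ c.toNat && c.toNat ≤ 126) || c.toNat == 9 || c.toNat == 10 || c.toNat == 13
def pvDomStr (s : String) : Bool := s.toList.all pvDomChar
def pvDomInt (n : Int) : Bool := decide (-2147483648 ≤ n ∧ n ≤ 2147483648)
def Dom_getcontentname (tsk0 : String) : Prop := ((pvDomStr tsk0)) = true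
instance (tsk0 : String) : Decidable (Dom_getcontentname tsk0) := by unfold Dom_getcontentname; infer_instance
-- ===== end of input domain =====

-- B replaces A's split-into-segments-and-rejoin loop by find-first-hyphen and one suffix slice (simpler, same cost).


-- ===== PORT A =====
def getcontentname (tsk0 : String) : String :=
  let sps_tsk := PySem.Chars.splitOn tsk0.toList ['-']
  String.ofList <|
    (PySem.List.enumerate sps_tsk).foldl
      (fun tsk ist =>
        let tsk := if ist.1 > 0 then tsk ++ ist.2 else tsk
        if ist.1 < (sps_tsk.length : Int) - 1 ∧ ist.1 > 0 then tsk ++ ['-'] else tsk)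
      []

-- ===== PORT B =====
def getcontentname_alt (tsk0 : String) : String :=
  let idx := PySem.Str.find tsk0 "-"
  if idx = -1 then "" else PySem.Str.slice tsk0 (some (idx + 1)) none

-- ===== PRECONDITION & SPEC =====
def Spec_getcontentname (tsk0 : String) (out : String) : Prop := out = getcontentname_alt tsk0
instance (tsk0 : String) (out : String) : Decidable (Spec_getcontentname tsk0 out) := by unfold Spec_getcontentname; infer_instance

-- ===== CLAIM (what is proved, stated in full; the proofs are below) =====
def Claim_equal_getcontentname : Prop := ∀ (tsk0 : String), Dom_getcontentname tsk0 → Spec_getcontentname tsk0 (getcontentname tsk0)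

-- ===== LEMMAS AND PROOFS =====

theorem pvModifyHeadId {α : Type} (l : List α) : List.modifyHead (fun x => x) l = l := by
  cases l <;> simp

-- structural version of splitting on a single hyphen
def pvSp1 : List Char → List (List Char)
  | [] => [[]]
  | c :: r => if c = '-' then [] :: pvSp1 r else (pvSp1 r).modifyHead (c :: ·)

theorem pvSp1_ne_nil (cs : List Char) : pvSp1 cs ≠ [] := by
  induction cs with
  | nil => simp [pvSp1]
  | cons c r ih =>
    simp only [pvSp1]
    split_ifs
    · simp
    · cases h : pvSp1 r with
      | nil => exact absurd h ih
      | cons a t => simp [List.modifyHead]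

theorem splitOn_go_eq : ∀ (cs : List Char) (fuel : Nat) (cur : List Char) (acc : List (List Char)),
    cs.length ≤ fuel →
    PySem.Chars.splitOn.go ['-'] fuel cs cur acc
      = acc.reverse ++ (pvSp1 cs).modifyHead (cur.reverse ++ ·) := by
  intro cs
  induction cs with
  | nil =>
    intro fuel cur acc _
    cases fuel <;> simp [PySem.Chars.splitOn.go, pvSp1]
  | cons c r ih =>
    intro fuel cur acc hf
    cases fuel with
    | zero => simp at hf
    | succ f =>
      simp only [PySem.Chars.splitOn.go]
      by_cases hc : c = '-'
      · subst hc
        have hpre : List.isPrefixOf ['-'] ('-' :: r) = true := by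
          simp [List.isPrefixOf]
        rw [if_pos hpre]
        have := ih f [] (cur.reverse :: acc) (by simp at hf; omega)
        rw [show List.drop ['-'].length ('-' :: r) = r from rfl, this]
        simp [pvSp1, pvModifyHeadId]
      · have hpre : List.isPrefixOf ['-'] (c :: r) = false := by
          simp [List.isPrefixOf, hc]
          intro h; exact absurd h.symm hc
        rw [if_neg (by simp [hpre])]
        have := ih f (c :: cur) acc (by simpa using Nat.lt_succ_iff.mp (Nat.lt_of_lt_of_le (by simp) hf))
        rw [this]
        simp only [pvSp1, if_neg hc]
        cases h : pvSp1 r with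
        | nil => exact absurd h (pvSp1_ne_nil r)
        | cons a t => simp [List.modifyHead]

theorem splitOn_eq_sp1 (cs : List Char) : PySem.Chars.splitOn cs ['-'] = pvSp1 cs := by
  have := splitOn_go_eq cs (cs.length + 1) [] [] (by omega)
  simpa [PySem.Chars.splitOn, pvModifyHeadId] using this

theorem findgo_eq : ∀ (cs : List Char) (k : Nat),
    PySem.Chars.find.go ['-'] cs k
      = if '-' ∈ cs then ((k + (cs.takeWhile (· ≠ '-')).length : Nat) : Int) else -1 := by
  intro cs
  induction cs with
  | nil => intro k; simp [PySem.Chars.find.go]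
  | cons c r ih =>
    intro k
    by_cases hc : c = '-'
    · subst hc
      have hpre : List.isPrefixOf ['-'] ('-' :: r) = true := by simp [List.isPrefixOf]
      simp [PySem.Chars.find.go, hpre, List.takeWhile]
    · have hpre : List.isPrefixOf ['-'] (c :: r) = false := by
        simp [List.isPrefixOf, Ne.symm hc]
      simp only [PySem.Chars.find.go, hpre, Bool.false_eq_true, if_false, ih]
      by_cases hm : '-' ∈ r
      · simp [hm, List.takeWhile, Ne.symm hc, hc]
        push_cast; ring
      · simp [hm, Ne.symm hc]

-- join ['-'] (pvSp1 cs) reconstructs cs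
theorem join_sp1_full (cs : List Char) : PySem.Chars.join ['-'] (pvSp1 cs) = cs := by
  induction cs with
  | nil => simp [pvSp1, PySem.Chars.join, List.intercalate]
  | cons c r ih =>
    by_cases hc : c = '-'
    · subst hc
      rw [show pvSp1 ('-' :: r) = [] :: pvSp1 r from by simp [pvSp1]]
      cases h : pvSp1 r with
      | nil => exact absurd h (pvSp1_ne_nil r)
      | cons a t =>
        rw [PySem.Chars.join_cons_cons]
        rw [h] at ih
        simp [ih]
    · simp only [pvSp1, if_neg hc]
      cases h : pvSp1 r with
      | nil => exact absurd h (pvSp1_ne_nil r)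
      | cons a t =>
        rw [h] at ih
        cases t with
        | nil =>
          simp [List.modifyHead, PySem.Chars.join, List.intercalate] at ih ⊢
          simp [ih]
        | cons b tb =>
          simp only [List.modifyHead]
          rw [PySem.Chars.join_cons_cons]
          rw [PySem.Chars.join_cons_cons] at ih
          simp [← ih]

theorem join_sp1_drop (cs : List Char) (h : '-' ∈ cs) :
    PySem.Chars.join ['-'] ((pvSp1 cs).drop 1)
      = cs.drop ((cs.takeWhile (· ≠ '-')).length + 1) := by
  induction cs with
  | nil => simp at h
  | cons c r ih =>
    by_cases hc : c = '-'
    · subst hc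
      simp only [pvSp1, if_pos rfl, List.drop_one, List.tail_cons]
      simp [List.takeWhile, join_sp1_full]
    · have hm : '-' ∈ r := by
        rcases List.mem_cons.mp h with h1 | h1
        · exact absurd h1.symm hc
        · exact h1
      have := ih hm
      simp only [pvSp1, if_neg hc]
      cases hsp : pvSp1 r with
      | nil => exact absurd hsp (pvSp1_ne_nil r)
      | cons a t =>
        rw [hsp] at this
        simp only [List.modifyHead, List.drop_one, List.tail_cons] at this ⊢
        rw [this]
        simp [List.takeWhile, hc, Ne.symm hc]

theorem sp1_no_dash (cs : List Char) (h : '-' ∉ cs) : pvSp1 cs = [cs] := by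
  induction cs with
  | nil => rfl
  | cons c r ih =>
    have hc : c ≠ '-' := fun hh => h (by simp [hh])
    have hm : '-' ∉ r := fun hh => h (by simp [hh])
    simp [pvSp1, hc, ih hm, List.modifyHead]

theorem enumerate_cons {α : Type} (h : α) (t : List α) (j : Int) :
    PySem.List.enumerate (h :: t) j = (j, h) :: PySem.List.enumerate t (j + 1) := rfl

theorem fold_go (n : Int) : ∀ (l : List (List Char)) (j : Int) (acc : List Char),
    1 ≤ j → n = j + l.length →
    (PySem.List.enumerate l j).foldl
      (fun tsk ist =>
        if ist.1 < n - 1 ∧ ist.1 > 0 then (if ist.1 > 0 then tsk ++ ist.2 else tsk) ++ ['-']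
        else if ist.1 > 0 then tsk ++ ist.2 else tsk)
      acc
      = acc ++ PySem.Chars.join ['-'] l := by
  intro l
  induction l with
  | nil => intro j acc _ _; simp [PySem.List.enumerate, PySem.Chars.join, List.intercalate]
  | cons h t ih =>
    intro j acc hj hn
    have hpos : (j > 0) = True := by simp; omega
    rw [enumerate_cons, List.foldl_cons]
    cases t with
    | nil =>
      have hlt : ¬ (j < n - 1) := by simp at hn; omega
      simp only [hpos, if_true, and_true, if_neg hlt, PySem.List.enumerate, List.foldl_nil]
      simp [PySem.Chars.join, List.intercalate]
    | cons b tb =>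
      have hlt : j < n - 1 := by simp at hn; omega
      simp only [hpos, if_true, and_true, if_pos hlt]
      rw [ih (j + 1) ((acc ++ h) ++ ['-']) (by omega) (by simp at hn ⊢; omega)]
      rw [PySem.Chars.join_cons_cons]
      simp

theorem fold_main (ps : List (List Char)) (hps : ps ≠ []) :
    (PySem.List.enumerate ps).foldl
      (fun tsk ist =>
        let tsk := if ist.1 > 0 then tsk ++ ist.2 else tsk
        if ist.1 < (ps.length : Int) - 1 ∧ ist.1 > 0 then tsk ++ ['-'] else tsk)
      []
      = PySem.Chars.join ['-'] (ps.drop 1) := by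
  cases ps with
  | nil => exact absurd rfl hps
  | cons p0 rest =>
    have h0 : ((0:Int) > 0) = False := by simp
    rw [enumerate_cons, List.foldl_cons]
    simp only [h0, if_false, and_false]
    rw [fold_go ((p0 :: rest).length : Int) rest (0 + 1) [] (by omega) (by simp; omega)]
    simp

-- ===== VERDICT (by name: the statement is the Claim_ definition above) =====
theorem getcontentname_spec : Claim_equal_getcontentname := by
  intro tsk0 _
  unfold Spec_getcontentname getcontentname getcontentname_alt
  simp only [splitOn_eq_sp1]
  rw [fold_main (pvSp1 tsk0.toList) (pvSp1_ne_nil _)]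
  have hfind : PySem.Str.find tsk0 "-" = PySem.Chars.find tsk0.toList ['-'] := by
    simp [PySem.Str.find]
  have hgo : PySem.Chars.find tsk0.toList ['-'] = PySem.Chars.find.go ['-'] tsk0.toList 0 := rfl
  by_cases hm : '-' ∈ tsk0.toList
  · have hidx : PySem.Str.find tsk0 "-" = ((tsk0.toList.takeWhile (· ≠ '-')).length : Int) := by
      rw [hfind, hgo, findgo_eq]
      simp [hm]
    rw [hidx]
    have hne : ¬ (((tsk0.toList.takeWhile (· ≠ '-')).length : Int) = -1) := by omega
    rw [if_neg hne]
    rw [join_sp1_drop tsk0.toList hm]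
    have : ((tsk0.toList.takeWhile (· ≠ '-')).length : Int) + 1
        = (((tsk0.toList.takeWhile (· ≠ '-')).length + 1 : Nat) : Int) := by push_cast; ring
    rw [PySem.Str.slice, PySem.Chars.slice]
    have hsl : ∀ (xs : List Char) (k : Nat),
        PySem.List.slice xs (some ((k : Int) + 1)) none = xs.drop (k + 1) := by
      intro xs k
      rw [show ((k : Int) + 1) = ((k + 1 : Nat) : Int) from by push_cast; ring,
        PySem.List.slice_from_natCast]
    rw [hsl]
  · have hidx : PySem.Str.find tsk0 "-" = -1 := by
      rw [hfind, hgo, findgo_eq]; simp [hm]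
    rw [hidx, if_pos rfl]
    rw [sp1_no_dash tsk0.toList hm]
    simp [PySem.Chars.join, List.intercalate]
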